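-- pv_equiv track=rewrite | github.com/NoisNette/Codesignal-solutions | reversedSumOfDigits.py | reversedSumOfDigits
-- ===== SOURCE A (Python) =====
-- def reversedSumOfDigits(p, n):
--     if p == 0 and n != 1: return '-1'
--     elif p == 0 and n == 1: return '0'
--     for i in range(10**(n-1), 10**n):
--         x = str(i)
--         s = 0
--         for j in x: s += int(j)
--         if s == p: return str(i)
--     return '-1'
-- ===== SOURCE B (Python) =====
-- def reversedSumOfDigits(p, n):
--     # greedy digit construction: smallest n-digit number with digit sum p,
--     # built directly (leading digit minimal nonzero, 9s packed at the right)
--     if p == 0: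
--         return '0' if n == 1 else '-1'
--     if p < 1 or p > 9 * n:
--         return '-1'
--     rem = p - 1
--     tail = []
--     for _ in range(n - 1):
--         d = min(9, rem)
--         rem -= d
--         tail.append(str(d))
--     tail.reverse()
--     return str(rem + 1) + ''.join(tail)
-- ===== Notes on version B (the rewrite author's own statement) =====
-- stated objective: faster
-- what changed: Replaced the brute-force scan over all 10^n - 10^(n-1) n-digit numbers (computing each digit sum via str conversion) by a direct greedy construction that fills the number from the right with 9s and puts the minimal nonzero remainder in the leading digit.
import Mathlib
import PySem

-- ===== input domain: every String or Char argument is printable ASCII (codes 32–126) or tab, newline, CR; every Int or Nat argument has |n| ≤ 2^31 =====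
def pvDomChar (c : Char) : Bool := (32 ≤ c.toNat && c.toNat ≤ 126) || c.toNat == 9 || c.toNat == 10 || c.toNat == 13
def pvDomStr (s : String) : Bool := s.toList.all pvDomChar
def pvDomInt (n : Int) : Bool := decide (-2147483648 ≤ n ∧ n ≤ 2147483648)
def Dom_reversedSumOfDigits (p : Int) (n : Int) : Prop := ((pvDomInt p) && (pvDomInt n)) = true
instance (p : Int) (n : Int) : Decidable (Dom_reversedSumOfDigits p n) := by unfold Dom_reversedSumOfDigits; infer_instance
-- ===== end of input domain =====

-- B replaces A's brute-force scan over all n-digit numbers by an O(n) greedy digit construction (objective: faster).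

-- ===== PORT A =====
-- int(j) for a single character j of str(i); exact here since every char of str(i), i ≥ 1, is a decimal digit
def pvIntOfChar (j : Char) : Int := (PySem.Int.ofChars? [j]).getD 0

-- the 'for i in range(lo, hi)' loop, iterated lazily exactly as Python's range is: at index i,
-- sum the digits of str(i) char by char and return str(i) on the first hit, else move to i+1
def pvALoop (p hi i : Int) : String :=
  if i < hi then
    if (PySem.Int.toStr i).toList.foldl (fun s j => s + pvIntOfChar j) 0 = p
    then PySem.Int.toStr i
    else pvALoop p hi (i + 1)
  else "-1"
termination_by (hi - i).toNat
decreasing_by omega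

def reversedSumOfDigits (p : Int) (n : Int) : String :=
  if p = 0 ∧ n ≠ 1 then "-1"
  else if p = 0 ∧ n = 1 then "0"
  else pvALoop p ((10:Int)^(n.toNat)) ((10:Int)^((n-1).toNat))
  -- for n ≤ 0 (and p ≠ 0) Python raises TypeError (10**(n-1) is a float given to range): outside Pre_

-- ===== PORT B =====
-- the 'for _ in range(n-1)' loop of Source B: repeatedly take d = min(9, rem) and append str(d)
def pvBLoop (rem : Int) (tail : List String) : Nat → Int × List String
  | 0 => (rem, tail)
  | k+1 => pvBLoop (rem - min 9 rem) (tail ++ [PySem.Int.toStr (min 9 rem)]) k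

def reversedSumOfDigits_alt (p : Int) (n : Int) : String :=
  if p = 0 then (if n = 1 then "0" else "-1")
  else if p < 1 ∨ 9 * n < p then "-1"
  else
    let r := pvBLoop (p - 1) [] (n - 1).toNat
    PySem.Int.toStr (r.1 + 1) ++ PySem.Str.join "" r.2.reverse

-- ===== PRECONDITION & SPEC =====
-- Pre_ excludes exactly the inputs where A raises TypeError: p ≠ 0 with n ≤ 0 (10**(n-1) is a float given to range)
def Pre_reversedSumOfDigits (p : Int) (n : Int) : Prop := p = 0 ∨ 1 ≤ n
instance (p : Int) (n : Int) : Decidable (Pre_reversedSumOfDigits p n) := by unfold Pre_reversedSumOfDigits; infer_instance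
def pvWitness_reversedSumOfDigits : Int × Int := (5, 2)

def Spec_reversedSumOfDigits (p : Int) (n : Int) (out : String) : Prop := out = reversedSumOfDigits_alt p n
instance (p : Int) (n : Int) (out : String) : Decidable (Spec_reversedSumOfDigits p n out) := by unfold Spec_reversedSumOfDigits; infer_instance

-- ===== CLAIM (what is proved, stated in full; the proofs are below) =====
def Claim_equal_reversedSumOfDigits : Prop := ∀ (p : Int) (n : Int), Dom_reversedSumOfDigits p n → Pre_reversedSumOfDigits p n → Spec_reversedSumOfDigits p n (reversedSumOfDigits p n)

-- ===== LEMMAS AND PROOFS =====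

-- digit sum of a natural number, base 10
def pvDsum (n : Nat) : Nat := if n = 0 then 0 else pvDsum (n / 10) + n % 10
  decreasing_by exact Nat.div_lt_self (by omega) (by omega)

-- decimal digit characters of n (empty for 0); agrees with Nat.toDigits 10 n for n ≥ 1
def pvRep (n : Nat) : List Char := if n = 0 then [] else pvRep (n / 10) ++ [Nat.digitChar (n % 10)]
  decreasing_by exact Nat.div_lt_self (by omega) (by omega)

theorem pvDsum_zero : pvDsum 0 = 0 := by rw [pvDsum]; rfl
theorem pvDsum_step (n : Nat) : pvDsum n = pvDsum (n / 10) + n % 10 := by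
  by_cases h : n = 0
  · subst h; simp
  · rw [pvDsum]; simp [h]
theorem pvDsum_small {n : Nat} (h : n < 10) : pvDsum n = n := by
  rw [pvDsum_step, Nat.div_eq_of_lt h, Nat.mod_eq_of_lt h]
  rw [pvDsum_zero]; omega
theorem pvDsum_mul10_add (a b : Nat) (hb : b < 10) : pvDsum (a * 10 + b) = pvDsum a + b := by
  rw [pvDsum_step]
  have h1 : (a * 10 + b) / 10 = a := by omega
  have h2 : (a * 10 + b) % 10 = b := by omega
  rw [h1, h2]
theorem pvDsum_split (k : Nat) : ∀ t low : Nat, low < 10 ^ k → pvDsum (t * 10 ^ k + low) = pvDsum t + pvDsum low := by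
  induction k with
  | zero => intro t low h; interval_cases low; simp [pvDsum_zero]
  | succ k ih =>
      intro t low h
      have hp : (10:Nat) ^ (k+1) = 10 ^ k * 10 := by ring
      have hlow : low / 10 < 10 ^ k := by omega
      have harith : t * 10 ^ (k+1) + low = (t * 10 ^ k + low / 10) * 10 + low % 10 := by
        have := Nat.div_add_mod low 10; nlinarith [Nat.div_add_mod low 10]
      rw [harith, pvDsum_mul10_add _ _ (by omega), ih _ _ hlow, pvDsum_step low]
      omega
theorem pvDsum_le (k : Nat) : ∀ n : Nat, n < 10 ^ k → pvDsum n ≤ 9 * k := by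
  induction k with
  | zero => intro n h; interval_cases n; simp [pvDsum_zero]
  | succ k ih =>
      intro n h
      have hp : (10:Nat) ^ (k+1) = 10 ^ k * 10 := by ring
      have h1 : n / 10 < 10 ^ k := by omega
      have := ih _ h1
      rw [pvDsum_step]; omega
theorem pvDsum_nines (k : Nat) : pvDsum (10 ^ k - 1) = 9 * k := by
  induction k with
  | zero => simp [pvDsum_zero]
  | succ k ih =>
      have hp : (10:Nat) ^ (k+1) = 10 ^ k * 10 := by ring
      have h1 : (1:Nat) ≤ 10 ^ k := Nat.one_le_pow _ _ (by omega)
      have harith : 10 ^ (k+1) - 1 = (10 ^ k - 1) * 10 + 9 := by omega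
      rw [harith, pvDsum_mul10_add _ _ (by omega), ih]; omega
theorem pvDsum_strict (k : Nat) : ∀ n : Nat, n + 2 ≤ 10 ^ k → pvDsum n + 1 ≤ 9 * k := by
  induction k with
  | zero => intro n h; simp at h
  | succ k ih =>
      intro n h
      have hp : (10:Nat) ^ (k+1) = 10 ^ k * 10 := by ring
      have h1 : (1:Nat) ≤ 10 ^ k := Nat.one_le_pow _ _ (by omega)
      rw [pvDsum_step]
      by_cases hc : n / 10 + 2 ≤ 10 ^ k
      · have := ih _ hc; omega
      · have he : n / 10 = 10 ^ k - 1 := by omega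
        have h9 : n % 10 ≤ 8 := by omega
        rw [he, pvDsum_nines]; omega
theorem pvDsum_pos (n : Nat) (h : 1 ≤ n) : 1 ≤ pvDsum n := by
  induction n using Nat.strong_induction_on with
  | _ n ih =>
      rw [pvDsum_step]
      by_cases hm : 1 ≤ n % 10
      · omega
      · have h1 : 1 ≤ n / 10 := by omega
        have := ih (n / 10) (Nat.div_lt_self (by omega) (by omega)) h1
        omega
theorem pvDsum_pow_add (j m : Nat) (hm : m ≤ 8) : pvDsum (10 ^ j + m) = 1 + m := by
  cases j with
  | zero => simp only [pow_zero]; rw [pvDsum_small (by omega)]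
  | succ j =>
      have h1 : (1:Nat) ≤ 10 ^ (j+1) := Nat.one_le_pow _ _ (by omega)
      have h2 : m < 10 ^ (j+1) := by
        have : (10:Nat) ≤ 10 ^ (j+1) := by
          calc (10:Nat) = 10 ^ 1 := by ring
          _ ≤ 10 ^ (j+1) := Nat.pow_le_pow_right (by omega) (by omega)
        omega
      have hs := pvDsum_split (j+1) 1 m h2
      have e1 : pvDsum 1 = 1 := pvDsum_small (by omega)
      have e2 : pvDsum m = m := pvDsum_small (by omega)
      rw [one_mul, e1, e2] at hs
      exact hs

theorem pvRep_zero : pvRep 0 = [] := by rw [pvRep]; rfl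
theorem pvRep_ne_zero {n : Nat} (h : n ≠ 0) : pvRep n = pvRep (n / 10) ++ [Nat.digitChar (n % 10)] := by
  rw [pvRep]; simp [h]
theorem pvRep_toDigitsCore (f : Nat) : ∀ n ds, 1 ≤ n → n < f → Nat.toDigitsCore 10 f n ds = pvRep n ++ ds := by
  induction f with
  | zero => intro n ds h1 h2; omega
  | succ f ih =>
      intro n ds h1 h2
      rw [Nat.toDigitsCore]
      by_cases hz : n / 10 = 0
      · simp only [hz]
        rw [pvRep_ne_zero (by omega), hz, pvRep_zero]
        simp
      · simp only [hz]
        rw [ih (n / 10) _ (by omega) (by have := Nat.div_lt_self (show 0 < n by omega) (show 1 < 10 by omega); omega)]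
        rw [pvRep_ne_zero (show n ≠ 0 by omega)]
        simp
theorem pvToChars_pos (i : Int) (h : 1 ≤ i) : PySem.Int.toChars i = pvRep i.toNat := by
  have hneg : ¬ i < 0 := by omega
  simp only [PySem.Int.toChars, if_neg hneg]
  unfold Nat.toDigits
  rw [pvRep_toDigitsCore (i.toNat + 1) i.toNat [] (by omega) (by omega)]
  simp
theorem pvRep_mul10_add (a b : Nat) (ha : 1 ≤ a) (hb : b < 10) : pvRep (a * 10 + b) = pvRep a ++ [Nat.digitChar b] := by
  rw [pvRep_ne_zero (by omega)]
  have h1 : (a * 10 + b) / 10 = a := by omega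
  have h2 : (a * 10 + b) % 10 = b := by omega
  rw [h1, h2]
theorem pvRep_nines (k : Nat) : ∀ T : Nat, 1 ≤ T → pvRep (T * 10 ^ k + (10 ^ k - 1)) = pvRep T ++ List.replicate k '9' := by
  induction k with
  | zero => intro T hT; simp
  | succ k ih =>
      intro T hT
      have hp : (10:Nat) ^ (k+1) = 10 ^ k * 10 := by ring
      have h1 : (1:Nat) ≤ 10 ^ k := Nat.one_le_pow _ _ (by omega)
      have harith : T * 10 ^ (k+1) + (10 ^ (k+1) - 1) = (T * 10 ^ k + (10 ^ k - 1)) * 10 + 9 := by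
        rw [hp]
        have e : T * (10 ^ k * 10) = T * 10 ^ k * 10 := by ring
        rw [e]; omega
      have hTQ : 0 < T * 10 ^ k := Nat.mul_pos (by omega) (by omega)
      rw [harith, pvRep_mul10_add _ _ (by omega) (by omega), ih T hT]
      have : Nat.digitChar 9 = '9' := rfl
      rw [this, List.append_assoc, ← List.replicate_succ' 
]
theorem pvRep_pow (j : Nat) : pvRep (10 ^ j) = '1' :: List.replicate j '0' := by
  induction j with
  | zero => rw [pow_zero, pvRep_ne_zero (by omega)]; norm_num [pvRep_zero]; rfl
  | succ j ih =>
      have harith : (10:Nat) ^ (j+1) = 10 ^ j * 10 + 0 := by ring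
      rw [harith, pvRep_mul10_add _ _ (Nat.one_le_pow _ _ (by omega)) (by omega), ih]
      have : Nat.digitChar 0 = '0' := rfl
      rw [this]; simp [List.replicate_succ']
theorem pvRep_pow_add (j m : Nat) (hm1 : 1 ≤ m) (hm : m ≤ 8) (hj : 1 ≤ j) : pvRep (10 ^ j + m) = ('1' :: List.replicate (j - 1) '0') ++ [Nat.digitChar m] := by
  obtain ⟨j', rfl⟩ : ∃ j', j = j' + 1 := ⟨j - 1, by omega⟩
  have harith : (10:Nat) ^ (j'+1) + m = 10 ^ j' * 10 + m := by ring
  rw [harith, pvRep_mul10_add _ _ (Nat.one_le_pow _ _ (by omega)) (by omega), pvRep_pow]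
  simp
theorem pvRep_small {n : Nat} (h1 : 1 ≤ n) (h : n < 10) : pvRep n = [Nat.digitChar n] := by
  rw [pvRep_ne_zero (by omega), Nat.div_eq_of_lt h, Nat.mod_eq_of_lt h, pvRep_zero]
  simp

theorem pvIntOfChar_digitChar (d : Nat) (h : d < 10) : pvIntOfChar (Nat.digitChar d) = (d : Int) := by
  interval_cases d <;> decide
theorem pvCsum_rep (n : Nat) : ∀ s : Int, (pvRep n).foldl (fun s j => s + pvIntOfChar j) s = s + pvDsum n := by
  induction n using Nat.strong_induction_on with
  | _ n ih =>
      intro s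
      by_cases hz : n = 0
      · subst hz; rw [pvRep_zero, pvDsum_zero]; simp
      · rw [pvRep_ne_zero hz, List.foldl_append]
        rw [ih (n / 10) (Nat.div_lt_self (by omega) (by omega)) s]
        simp only [List.foldl_cons, List.foldl_nil]
        rw [pvIntOfChar_digitChar _ (by omega), pvDsum_step n]
        push_cast
        ring

theorem pvALoop_stop (p hi i : Int) (h : hi ≤ i) : pvALoop p hi i = "-1" := by
  rw [pvALoop, if_neg (by omega)]

theorem pvALoop_step (p hi i : Int) (hlt : i < hi) (h1 : 1 ≤ i) :
    pvALoop p hi i = if (pvDsum i.toNat : Int) = p then PySem.Int.toStr i else pvALoop p hi (i + 1) := by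
  rw [pvALoop, if_pos hlt, PySem.Int.toList_toStr, pvToChars_pos i h1, pvCsum_rep]
  simp

theorem pvALoop_skip (p hi : Int) (cnt : Nat) : ∀ i : Int, i + cnt ≤ hi →
    (∀ x : Int, i ≤ x → x < i + cnt → 1 ≤ x ∧ (pvDsum x.toNat : Int) ≠ p) →
    pvALoop p hi i = pvALoop p hi (i + cnt) := by
  induction cnt with
  | zero => intro i _ _; norm_num
  | succ c ih =>
      intro i hb hc
      have hin := hc i le_rfl (by push_cast; omega)
      rw [pvALoop_step p hi i (by push_cast at hb; omega) hin.1, if_neg hin.2]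
      have hrec := ih (i + 1) (by push_cast at hb ⊢; omega)
        (fun x hx1 hx2 => hc x (by omega) (by push_cast at hx2 ⊢; omega))
      rw [hrec]
      congr 1
      push_cast
      ring

theorem pvBLoop_nines (j : Nat) : ∀ (rem : Int) (tail : List String) (s : Nat), 9 * (j : Int) ≤ rem →
    pvBLoop rem tail (j + s) = pvBLoop (rem - 9 * (j : Int)) (tail ++ List.replicate j (PySem.Int.toStr 9)) s := by
  induction j with
  | zero => intro rem tail s h; simp
  | succ j ih =>
      intro rem tail s h
      have h9 : (9:Int) ≤ rem := by push_cast at h ⊢; omega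
      have hmin : min (9:Int) rem = 9 := by omega
      have hstep : (j + 1) + s = (j + s) + 1 := by omega
      rw [hstep]
      show pvBLoop (rem - min 9 rem) (tail ++ [PySem.Int.toStr (min 9 rem)]) (j + s) = _
      rw [hmin, ih (rem - 9) _ s (by push_cast at h ⊢; omega)]
      congr 1
      · push_cast; ring
      · rw [List.append_assoc, List.replicate_succ]
        rfl
theorem pvBLoop_zeros (s : Nat) : ∀ tail : List String, pvBLoop 0 tail s = (0, tail ++ List.replicate s (PySem.Int.toStr 0)) := by
  induction s with
  | zero => intro tail; simp [pvBLoop]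
  | succ s ih =>
      intro tail
      show pvBLoop (0 - min 9 0) (tail ++ [PySem.Int.toStr (min 9 0)]) s = _
      have hmin : min (9:Int) 0 = 0 := by omega
      rw [hmin]
      norm_num [ih (tail ++ [PySem.Int.toStr 0])]
      rw [List.replicate_succ]
theorem pvBLoop_final (m : Int) (hm0 : 0 ≤ m) (hm : m ≤ 8) (s : Nat) (hs : 1 ≤ s) (tail : List String) :
    pvBLoop m tail s = (0, tail ++ [PySem.Int.toStr m] ++ List.replicate (s - 1) (PySem.Int.toStr 0)) := by
  obtain ⟨s', rfl⟩ : ∃ s', s = s' + 1 := ⟨s - 1, by omega⟩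
  show pvBLoop (m - min 9 m) (tail ++ [PySem.Int.toStr (min 9 m)]) s' = _
  have hmin : min (9:Int) m = m := by omega
  rw [hmin]
  norm_num [pvBLoop_zeros s' (tail ++ [PySem.Int.toStr m])]

-- flattening a join with empty separator
theorem pvJoin_toList (l : List String) : (PySem.Str.join "" l).toList = (l.map String.toList).flatten := by
  simp only [PySem.Str.join, String.toList_empty, String.toList_ofList]
  show List.intercalate [] _ = _
  unfold List.intercalate
  induction (l.map String.toList) with
  | nil => rfl
  | cons a t ih =>
      cases t with
      | nil => simp
      | cons b t' => simp [List.intersperse] at ih ⊢; exact ih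
theorem pvFlatten_replicate (k : Nat) (c : Char) : (List.replicate k [c]).flatten = List.replicate k c := by
  induction k with
  | zero => rfl
  | succ k ih => simp [List.replicate_succ] at *

-- the greedy value: smallest N-digit number with digit sum P (for 1 ≤ P ≤ 9N)
def pvG (P N : Nat) : Nat := 10 ^ (N-1) + (((P-1) % 9 + 1) * 10 ^ ((P-1)/9) - 1)

theorem pvG_eq (P N : Nat) (hN : 1 ≤ N) (hP1 : 1 ≤ P) (hP2 : P ≤ 9*N) :
    pvG P N = (10^(N-1-(P-1)/9) + (P-1)%9) * 10^((P-1)/9) + (10^((P-1)/9) - 1) := by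
  have hk : (P-1)/9 ≤ N-1 := by omega
  have hsp : (10:Nat)^(N-1) = 10^(N-1-(P-1)/9) * 10^((P-1)/9) := by
    rw [← pow_add]; congr 1; omega
  have hQ : 1 ≤ (10:Nat)^((P-1)/9) := Nat.one_le_pow _ _ (by omega)
  unfold pvG
  rw [hsp]
  have e1 : ((P-1)%9+1) * 10^((P-1)/9) = (P-1)%9 * 10^((P-1)/9) + 10^((P-1)/9) := by ring
  have e2 : (10^(N-1-(P-1)/9) + (P-1)%9) * 10^((P-1)/9)
      = 10^(N-1-(P-1)/9) * 10^((P-1)/9) + (P-1)%9 * 10^((P-1)/9) := by ring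
  omega

theorem pvG_lb (P N : Nat) : 10^(N-1) ≤ pvG P N := by
  unfold pvG; omega

theorem pvG_ub (P N : Nat) (hN : 1 ≤ N) (hP1 : 1 ≤ P) (hP2 : P ≤ 9*N) : pvG P N < 10^N := by
  have hk : (P-1)/9 ≤ N-1 := by omega
  have e10 : (10:Nat)^N = 10 * 10^(N-1) := by
    rw [← pow_succ']; congr 1; omega
  have hQ : 1 ≤ (10:Nat)^((P-1)/9) := Nat.one_le_pow _ _ (by omega)
  have hpow : (10:Nat)^((P-1)/9) ≤ 10^(N-1) := Nat.pow_le_pow_right (by omega) hk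
  have hmul : ((P-1)%9+1) * 10^((P-1)/9) ≤ 9 * 10^(N-1) := Nat.mul_le_mul (by omega) hpow
  unfold pvG
  omega

theorem pvG_dsum (P N : Nat) (hN : 1 ≤ N) (hP1 : 1 ≤ P) (hP2 : P ≤ 9*N) : pvDsum (pvG P N) = P := by
  have hQ : 1 ≤ (10:Nat)^((P-1)/9) := Nat.one_le_pow _ _ (by omega)
  rw [pvG_eq P N hN hP1 hP2, pvDsum_split _ _ _ (by omega), pvDsum_pow_add _ _ (by omega), pvDsum_nines]
  omega

theorem pvG_min (P N : Nat) (hN : 1 ≤ N) (hP1 : 1 ≤ P) (hP2 : P ≤ 9*N) :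
    ∀ x : Nat, 10^(N-1) ≤ x → x < pvG P N → pvDsum x < P := by
  intro x hx1 hx2
  have hgT := pvG_eq P N hN hP1 hP2
  set k := (P-1)/9 with hkdef
  set m := (P-1)%9 with hmdef
  have hk : k ≤ N-1 := by omega
  have hm : m ≤ 8 := by omega
  have hQ : 1 ≤ (10:Nat)^k := Nat.one_le_pow _ _ (by omega)
  have hJ : 1 ≤ (10:Nat)^(N-1-k) := Nat.one_le_pow _ _ (by omega)
  have hsp : (10:Nat)^(N-1) = 10^(N-1-k) * 10^k := by rw [← pow_add]; congr 1; omega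
  rw [hgT] at hx2
  have hdm := Nat.div_add_mod x (10^k)
  have hxtl : x = x / 10^k * 10^k + x % 10^k := by rw [Nat.mul_comm] at hdm; omega
  have hlow : x % 10^k < 10^k := Nat.mod_lt _ (by omega)
  have hsplit : pvDsum x = pvDsum (x / 10^k) + pvDsum (x % 10^k) := by
    conv_lhs => rw [hxtl]
    exact pvDsum_split k _ _ hlow
  have htJ : 10^(N-1-k) ≤ x / 10^k := by
    rw [Nat.le_div_iff_mul_le (by omega : 0 < 10^k), ← hsp]
    exact hx1
  have htT : x / 10^k ≤ 10^(N-1-k) + m := by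
    by_contra hc
    push Not at hc
    have h5 : (10^(N-1-k) + m + 1) * 10^k ≤ x / 10^k * 10^k := Nat.mul_le_mul_right _ (by omega)
    have h6 : x / 10^k * 10^k ≤ x := by omega
    have e3 : (10^(N-1-k) + m + 1) * 10^k = (10^(N-1-k) + m) * 10^k + 10^k := by ring
    omega
  by_cases hcase : x / 10^k = 10^(N-1-k) + m
  · have hlow2 : x % 10^k + 2 ≤ 10^k := by
      rw [hcase] at hxtl
      omega
    have hstrict := pvDsum_strict k (x % 10^k) hlow2
    have hT : pvDsum (x / 10^k) = 1 + m := by rw [hcase]; exact pvDsum_pow_add _ _ hm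
    omega
  · have htlt : x / 10^k < 10^(N-1-k) + m := by omega
    have hm1 : 1 ≤ m := by omega
    have hrw : x / 10^k = 10^(N-1-k) + (x / 10^k - 10^(N-1-k)) := by omega
    have hT : pvDsum (x / 10^k) = 1 + (x / 10^k - 10^(N-1-k)) := by
      conv_lhs => rw [hrw]
      rw [pvDsum_pow_add _ _ (by omega)]
    have hle := pvDsum_le k (x % 10^k) hlow
    omega

theorem pvA_eval (p n : Int) (hn : 1 ≤ n) (hp1 : 1 ≤ p) (hp2 : p ≤ 9*n) :
    pvALoop p ((10:Int)^(n.toNat)) ((10:Int)^((n-1).toNat))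
      = PySem.Int.toStr ((pvG p.toNat n.toNat : Nat) : Int) := by
  set N := n.toNat with hNdef
  set P := p.toNat with hPdef
  have hc1 : (N:Int) = n := Int.toNat_of_nonneg (by omega)
  have hc2 : (P:Int) = p := Int.toNat_of_nonneg (by omega)
  have hN : 1 ≤ N := by omega
  have hP1 : 1 ≤ P := by omega
  have hP2 : P ≤ 9*N := by omega
  have hn1 : (n-1).toNat = N - 1 := by omega
  have hcastlo : ((10:Int))^((n-1).toNat) = ((10^(N-1) : Nat) : Int) := by rw [hn1]; push_cast; rfl
  have hcasthi : ((10:Int))^(n.toNat) = ((10^N : Nat) : Int) := by push_cast; rfl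
  have hlb := pvG_lb P N
  have hub := pvG_ub P N hN hP1 hP2
  have hds := pvG_dsum P N hN hP1 hP2
  have hmin := pvG_min P N hN hP1 hP2
  have h1pow : (1:Nat) ≤ 10^(N-1) := Nat.one_le_pow _ _ (by omega)
  rw [hcastlo, hcasthi]
  have hcnt : ((10^(N-1) : Nat) : Int) + ((pvG P N - 10^(N-1) : Nat) : Int) = ((pvG P N : Nat) : Int) := by
    omega
  rw [pvALoop_skip p _ (pvG P N - 10^(N-1)) _ (by rw [hcnt]; exact_mod_cast le_of_lt hub) ?cond]
  case cond =>
    intro x hx1 hx2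
    rw [hcnt] at hx2
    have hx1' : (1:Int) ≤ x := le_trans (by exact_mod_cast h1pow) hx1
    refine ⟨hx1', ?_⟩
    have := hmin x.toNat (by omega) (by omega)
    omega
  rw [hcnt, pvALoop_step p _ _ (by exact_mod_cast hub) (by exact_mod_cast le_trans h1pow hlb)]
  rw [if_pos (by rw [Int.toNat_natCast, hds, hc2])]

theorem pvB_eval (p n : Int) (hn : 1 ≤ n) (hp1 : 1 ≤ p) (hp2 : p ≤ 9*n) :
    reversedSumOfDigits_alt p n = PySem.Int.toStr ((pvG p.toNat n.toNat : Nat) : Int) := by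
  set N := n.toNat with hNdef
  set P := p.toNat with hPdef
  have hc1 : (N:Int) = n := Int.toNat_of_nonneg (by omega)
  have hc2 : (P:Int) = p := Int.toNat_of_nonneg (by omega)
  have hN : 1 ≤ N := by omega
  have hP1 : 1 ≤ P := by omega
  have hP2 : P ≤ 9*N := by omega
  have hgT := pvG_eq P N hN hP1 hP2
  set k := (P-1)/9 with hkdef
  set m := (P-1)%9 with hmdef
  have hk : k ≤ N-1 := by omega
  have hm : m ≤ 8 := by omega
  have hlb := pvG_lb P N
  have hg1 : (1:Int) ≤ ((pvG P N : Nat) : Int) := by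
    have h1pow : (1:Nat) ≤ 10^(N-1) := Nat.one_le_pow _ _ (by omega)
    exact_mod_cast le_trans h1pow hlb
  unfold reversedSumOfDigits_alt
  rw [if_neg (by omega : ¬ p = 0), if_neg (by simp only [not_or, not_lt]; exact ⟨hp1, hp2⟩)]
  show PySem.Int.toStr ((pvBLoop (p-1) [] (n-1).toNat).1 + 1)
      ++ PySem.Str.join "" (pvBLoop (p-1) [] (n-1).toNat).2.reverse = _
  have hsteps : (n-1).toNat = k + (N-1-k) := by omega
  rw [hsteps, pvBLoop_nines k (p-1) [] (N-1-k) (by omega)]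
  have hrem : p - 1 - 9*(k:Int) = (m:Int) := by omega
  rw [hrem]
  simp only [List.nil_append]
  apply String.toList_inj.mp
  by_cases hs : N-1-k = 0
  · -- k = N-1: the loop subtracts 9 at every step; leading digit is m+1
    rw [hs]
    show (PySem.Int.toStr ((m:Int) + 1) ++ PySem.Str.join "" (List.replicate k (PySem.Int.toStr 9)).reverse).toList = _
    rw [String.toList_append, PySem.Int.toList_toStr, PySem.Int.toList_toStr, pvJoin_toList]
    rw [pvToChars_pos _ (by omega), pvToChars_pos _ hg1]
    have hmt : ((m:Int) + 1).toNat = m + 1 := by omega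
    rw [hmt, Int.toNat_natCast]
    rw [List.reverse_replicate, List.map_replicate]
    have h9 : (PySem.Int.toStr 9).toList = ['9'] := by decide
    rw [h9, pvFlatten_replicate]
    rw [hgT, hs, pow_zero]
    rw [pvRep_nines k (1 + m) (by omega)]
    rw [Nat.add_comm 1 m]
  · by_cases hm0 : m = 0
    · -- only 9s then 0s; leading digit 1
      rw [hm0]
      show ((fun r => PySem.Int.toStr (r.1 + 1) ++ PySem.Str.join "" r.2.reverse)
            (pvBLoop (((0:Nat)):Int) (List.replicate k (PySem.Int.toStr 9)) (N-1-k))).toList = _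
      rw [Nat.cast_zero, pvBLoop_zeros]
      simp only
      rw [String.toList_append, PySem.Int.toList_toStr, PySem.Int.toList_toStr, pvJoin_toList]
      rw [pvToChars_pos _ (by omega), pvToChars_pos _ hg1]
      have h01 : ((0:Int) + 1).toNat = 1 := by omega
      rw [h01, Int.toNat_natCast]
      rw [List.reverse_append, List.reverse_replicate, List.reverse_replicate]
      rw [List.map_append, List.map_replicate, List.map_replicate]
      have h9 : (PySem.Int.toStr 9).toList = ['9'] := by decide
      have h0 : (PySem.Int.toStr 0).toList = ['0'] := by decide
      rw [h9, h0, List.flatten_append, pvFlatten_replicate, pvFlatten_replicate]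
      rw [hgT, hm0, Nat.add_zero]
      rw [pvRep_nines _ _ (Nat.one_le_pow _ _ (by omega)), pvRep_pow]
      rw [pvRep_small (by omega) (by omega)]
      have e1 : Nat.digitChar 1 = '1' := rfl
      rw [e1]
      simp
    · -- 9s, then the digit m, then 0s; leading digit 1
      show ((fun r => PySem.Int.toStr (r.1 + 1) ++ PySem.Str.join "" r.2.reverse)
            (pvBLoop (((m:Nat)):Int) (List.replicate k (PySem.Int.toStr 9)) (N-1-k))).toList = _
      rw [pvBLoop_final _ (by omega) (by omega) (N-1-k) (by omega)]
      simp only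
      rw [String.toList_append, PySem.Int.toList_toStr, PySem.Int.toList_toStr, pvJoin_toList]
      rw [pvToChars_pos _ (by omega), pvToChars_pos _ hg1]
      have h01 : ((0:Int) + 1).toNat = 1 := by omega
      rw [h01, Int.toNat_natCast]
      simp only [List.reverse_append, List.reverse_replicate, List.reverse_singleton]
      simp only [List.map_append, List.map_replicate, List.map_singleton]
      have h9 : (PySem.Int.toStr 9).toList = ['9'] := by decide
      have h0 : (PySem.Int.toStr 0).toList = ['0'] := by decide
      have hmstr : (PySem.Int.toStr ((m:Nat):Int)).toList = [Nat.digitChar m] := by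
        rw [PySem.Int.toList_toStr, pvToChars_pos _ (by omega), Int.toNat_natCast]
        exact pvRep_small (by omega) (by omega)
      rw [h9, h0, hmstr]
      simp only [List.flatten_append, List.flatten_cons, List.flatten_nil, pvFlatten_replicate]
      rw [hgT]
      rw [pvRep_nines _ _ (by have := Nat.one_le_pow (N-1-k) 10 (by omega); omega),
          pvRep_pow_add (N-1-k) m (by omega) hm (by omega)]
      rw [pvRep_small (by omega) (by omega)]
      have e1 : Nat.digitChar 1 = '1' := rfl
      rw [e1]
      simp

-- ===== VERDICT (by name: the statement is the Claim_ definition above) =====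
theorem reversedSumOfDigits_spec : Claim_equal_reversedSumOfDigits := by
  intro p n hdom hpre
  unfold Spec_reversedSumOfDigits
  by_cases hp0 : p = 0
  · subst hp0
    unfold reversedSumOfDigits reversedSumOfDigits_alt
    by_cases hn1 : n = 1
    · subst hn1; norm_num
    · simp [hn1]
  · have hn : 1 ≤ n := by
      rcases hpre with h | h
      · exact absurd h hp0
      · exact h
    by_cases hr : 1 ≤ p ∧ p ≤ 9*n
    · rw [pvB_eval p n hn hr.1 hr.2]
      unfold reversedSumOfDigits
      rw [if_neg (by tauto), if_neg (by tauto)]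
      exact pvA_eval p n hn hr.1 hr.2
    · unfold reversedSumOfDigits reversedSumOfDigits_alt
      rw [if_neg (by tauto), if_neg (by tauto), if_neg hp0,
          if_pos (by omega : p < 1 ∨ 9*n < p)]
      set N := n.toNat with hNdef
      have hc1 : (N:Int) = n := Int.toNat_of_nonneg (by omega)
      have hn1 : (n-1).toNat = N - 1 := by omega
      have h1pow : (1:Nat) ≤ 10^(N-1) := Nat.one_le_pow _ _ (by omega)
      have hple : (10:Nat)^(N-1) ≤ 10^N := Nat.pow_le_pow_right (by omega) (by omega)
      have hcastlo : ((10:Int))^((n-1).toNat) = ((10^(N-1) : Nat) : Int) := by rw [hn1]; push_cast; rfl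
      have hcasthi : ((10:Int))^(n.toNat) = ((10^N : Nat) : Int) := by push_cast; rfl
      rw [hcastlo, hcasthi]
      have hcnt : ((10^(N-1) : Nat) : Int) + ((10^N - 10^(N-1) : Nat) : Int) = ((10^N : Nat) : Int) := by
        omega
      rw [pvALoop_skip p _ (10^N - 10^(N-1)) _ (by rw [hcnt]) ?cond]
      case cond =>
        intro x hx1 hx2
        rw [hcnt] at hx2
        have hx1' : (1:Int) ≤ x := le_trans (by exact_mod_cast h1pow) hx1
        refine ⟨hx1', ?_⟩
        have hup : x.toNat < 10^N := by omega
        have hle := pvDsum_le N x.toNat hup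
        have hpos := pvDsum_pos x.toNat (by omega)
        omega
      rw [hcnt, pvALoop_stop _ _ _ le_rfl]
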